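-- pv_equiv track=rewrite | github.com/alexnowakvila/DataChallenge-KernelMethods | Code/Alex/utils.py | kernel
-- ===== SOURCE A (Python) =====
-- def kernel(x1, x2):
--   n1 = len(x1)
--   n2 = len(x2)
--   d = {}
--   K = 0
--   for i in range(n1):
--     if x1[i] in d:
--       d[x1[i]] += 1
--     else:
--       d[x1[i]] = 1
--   for j in range(n2):
--     if x2[j] in d:
--       K += d[x2[j]]
--   return K
-- ===== SOURCE B (Python) =====
-- def kernel(x1, x2):
--     c1 = {}
--     for v in x1:
--         c1[v] = c1.get(v, 0) + 1
--     c2 = {}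
--     for v in x2:
--         c2[v] = c2.get(v, 0) + 1
--     return sum(c1.get(k, 0) * c2[k] for k in c2)
-- ===== Notes on version B (the rewrite author's own statement) =====
-- stated objective: alternative
-- what changed: A scans x2 element by element, looking up each element in a table of x1; B builds frequency tables of BOTH sequences and returns the dot product over the distinct keys of x2's table, so the second pass runs over distinct keys with multiplied counts instead of over every x2 element.
import Mathlib
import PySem

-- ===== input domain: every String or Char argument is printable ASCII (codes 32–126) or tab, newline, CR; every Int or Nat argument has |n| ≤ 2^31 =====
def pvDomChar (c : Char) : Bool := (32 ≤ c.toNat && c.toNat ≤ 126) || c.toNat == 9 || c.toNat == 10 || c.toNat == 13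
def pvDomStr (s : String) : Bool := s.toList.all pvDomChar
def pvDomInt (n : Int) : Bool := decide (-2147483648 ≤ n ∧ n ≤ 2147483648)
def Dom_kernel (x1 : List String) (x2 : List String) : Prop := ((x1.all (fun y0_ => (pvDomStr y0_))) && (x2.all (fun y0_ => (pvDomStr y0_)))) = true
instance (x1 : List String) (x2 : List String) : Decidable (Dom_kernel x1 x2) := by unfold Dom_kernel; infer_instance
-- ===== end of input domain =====

-- B replaces A's per-element scan of x2 by a dot product of two frequency tables over x2's distinct keys (alternative decomposition, same asymptotic cost).

-- ===== PORT A =====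
def kernel (x1 : List String) (x2 : List String) : Int :=
  -- first loop: build d counting x1, with A's explicit membership branch
  let d : PySem.Dict String Int :=
    x1.foldl (fun d x => if d.contains x then d.insert x (d.getD x 0 + 1) else d.insert x 1)
      PySem.Dict.empty
  -- second loop: scan x2, adding d[x] when present
  x2.foldl (fun K x => if d.contains x then K + d.getD x 0 else K) 0

-- ===== PORT B =====
def kernel_alt (x1 : List String) (x2 : List String) : Int :=
  let c1 : PySem.Dict String Int :=
    x1.foldl (fun d v => d.insert v (d.getD v 0 + 1)) PySem.Dict.empty
  let c2 : PySem.Dict String Int :=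
    x2.foldl (fun d v => d.insert v (d.getD v 0 + 1)) PySem.Dict.empty
  (c2.keys.map (fun k => c1.getD k 0 * c2.getD k 0)).sum

-- ===== PRECONDITION & SPEC =====
def Spec_kernel (x1 : List String) (x2 : List String) (out : Int) : Prop := out = kernel_alt x1 x2
instance (x1 : List String) (x2 : List String) (out : Int) : Decidable (Spec_kernel x1 x2 out) := by unfold Spec_kernel; infer_instance

-- ===== CLAIM (what is proved, stated in full; the proofs are below) =====
def Claim_equal_kernel : Prop := ∀ (x1 : List String) (x2 : List String), Dom_kernel x1 x2 → Spec_kernel x1 x2 (kernel x1 x2)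

-- ===== LEMMAS AND PROOFS =====

-- A's branchy counting step is the plain 'd[x] = d.get(x,0)+1' step (the else-branch sees getD = 0).
lemma stepA_eq :
    (fun (d : PySem.Dict String Int) x =>
      if d.contains x then d.insert x (d.getD x 0 + 1) else d.insert x 1)
    = (fun (d : PySem.Dict String Int) x => d.insert x (d.getD x 0 + 1)) := by
  funext d x
  by_cases h : d.contains x = true
  · simp [h]
  · simp only [Bool.not_eq_true] at h
    simp [h, PySem.Dict.getD_of_not_contains d 0 h]

-- sum of a single-point indicator over a Nodup list containing x
lemma sum_indicator (f : String → Int) (x : String) :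
    ∀ (s : List String), s.Nodup → x ∈ s →
      (s.map (fun k => if k = x then f k else 0)).sum = f x := by
  intro s
  induction s with
  | nil => intro _ h; cases h
  | cons a t ih =>
    intro hs hx
    rcases List.nodup_cons.mp hs with ⟨ha, ht⟩
    by_cases hax : a = x
    · subst hax
      have h0 : (t.map (fun k => if k = a then f k else 0)).sum = 0 := by
        apply List.sum_eq_zero
        intro y hy
        rcases List.mem_map.mp hy with ⟨k, hk, rfl⟩
        have hka : ¬ k = a := fun h => ha (h ▸ hk)
        simp [hka]
      simp [h0]
    · have hxt : x ∈ t := by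
        rcases List.mem_cons.mp hx with h | h
        · exact absurd h.symm hax
        · exact h
      simp [hax, ih ht hxt]

-- element-wise sum over x2 = key-wise sum weighted by multiplicities, over any Nodup superset of x2's elements
lemma key_sum (f : String → Int) :
    ∀ (x2 s : List String), s.Nodup → (∀ x ∈ x2, x ∈ s) →
      (x2.map f).sum = (s.map (fun k => f k * (x2.count k : Int))).sum := by
  intro x2
  induction x2 with
  | nil =>
    intro s _ _
    simp
  | cons x t ih =>
    intro s hs hsub
    have hxs : x ∈ s := hsub x (by simp)
    have hstep : ∀ k : String,
        f k * (((x :: t).count k : Nat) : Int)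
          = f k * (t.count k : Int) + (if k = x then f k else 0) := by
      intro k
      by_cases hk : k = x
      · subst hk; simp [List.count_cons_self]; ring
      · rw [List.count_cons_of_ne (Ne.symm hk)]; simp [hk]
    calc ((x :: t).map f).sum
        = f x + (t.map f).sum := by simp
      _ = f x + (s.map (fun k => f k * (t.count k : Int))).sum := by
            rw [ih s hs (fun y hy => hsub y (by simp [hy]))]
      _ = (s.map (fun k => f k * (t.count k : Int))).sum
            + (s.map (fun k => if k = x then f k else 0)).sum := by
            rw [sum_indicator f x s hs hxs]; ring
      _ = (s.map (fun k => f k * (((x :: t).count k : Nat) : Int))).sum := by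
            rw [← List.sum_map_add]
            exact (List.map_congr_left (fun k _ => (hstep k).symm)) ▸ rfl

-- A's second loop: since getD of a missing key is the default 0, the membership test is redundant
lemma loopK (d : PySem.Dict String Int) :
    ∀ (l : List String) (K : Int),
      l.foldl (fun K x => if d.contains x then K + d.getD x 0 else K) K
        = K + (l.map (fun x => d.getD x 0)).sum := by
  intro l
  induction l with
  | nil => intro K; simp
  | cons a t ih =>
    intro K
    by_cases h : d.contains a = true
    · simp only [List.foldl_cons, h, if_true, ih, List.map_cons, List.sum_cons]; ring
    · simp only [Bool.not_eq_true] at h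
      simp only [List.foldl_cons, h, Bool.false_eq_true, if_false, ih, List.map_cons,
        List.sum_cons, PySem.Dict.getD_of_not_contains d 0 h]
      ring

theorem kernel_eq_sum (x1 x2 : List String) :
    kernel x1 x2 = (x2.map (fun x => (x1.count x : Int))).sum := by
  simp only [kernel]
  rw [stepA_eq, loopK]
  have hget : ∀ x, (x1.foldl (fun d v => d.insert v (d.getD v 0 + 1))
      (PySem.Dict.empty : PySem.Dict String Int)).getD x 0 = (x1.count x : Int) := by
    intro x
    rw [PySem.Dict.getD_foldl_insert_add_one]
    simp
  simp only [hget, zero_add]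

-- ===== VERDICT (by name: the statement is the Claim_ definition above) =====
theorem kernel_spec : Claim_equal_kernel := by
  intro x1 x2 _
  simp only [Spec_kernel, kernel_alt]
  rw [kernel_eq_sum]
  rw [PySem.Dict.foldl_insert_getD_add_one_eq_counter,
      PySem.Dict.foldl_insert_getD_add_one_eq_counter,
      PySem.Dict.keys_counter]
  have hmap : ((PySem.Set.ofList x2 : List String).map
        (fun k => (PySem.Dict.counter x1).getD k 0 * (PySem.Dict.counter x2).getD k 0))
      = (PySem.Set.ofList x2 : List String).map
        (fun k => (x1.count k : Int) * (x2.count k : Int)) := by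
    apply List.map_congr_left
    intro k _
    rw [PySem.Dict.getD_counter, PySem.Dict.getD_counter]
  rw [hmap]
  exact key_sum (fun x => (x1.count x : Int)) x2 (PySem.Set.ofList x2)
    (PySem.Set.nodup_ofList x2) (fun x hx => (PySem.Set.mem_ofList x2 x).mpr hx)
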